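-- pv_equiv track=rewrite | github.com/rodom1018/algorithms | string/17609_회문.py | check
-- ===== SOURCE A (Python) =====
-- def judge(temp):
--     rev_temp = temp[::-1]
--     if rev_temp == temp:
--         return 1
--     else: return 0
--
-- def check(temp_word):
--     start_point = 0
--     end_point = len(temp_word) - 1
--     while True:
--         if start_point > end_point : break
--
--         if temp_word[start_point] == temp_word[end_point]:
--             start_point+=1
--             end_point -=1
--         else:
--             if temp_word[start_point+1] == temp_word[end_point] and temp_word[start_point] == temp_word[end_point-1]:
--                 a=judge(temp_word[start_point+1:end_point+1])
--                 b=judge(temp_word[start_point:end_point])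
--                 if a==1 or b==1: return 1
--                 else: return 2
--
--             elif temp_word[start_point+1] == temp_word[end_point]:
--                 a=judge(temp_word[start_point+1:end_point+1])
--                 if a==1: return 1
--                 else: return 2
--             elif temp_word[start_point] == temp_word[end_point-1]:
--                 b=judge(temp_word[start_point:end_point])
--                 if b==1: return 1
--                 else: return 2
--             else: return 2
--
--     return 0
-- ===== SOURCE B (Python) =====
-- def check(temp_word):
--     if temp_word == temp_word[::-1]:
--         return 0
--     for k in range(len(temp_word)):
--         t = temp_word[:k] + temp_word[k + 1:]
--         if t == t[::-1]:
--             return 1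
--     return 2
-- ===== Notes on version B (the rewrite author's own statement) =====
-- stated objective: alternative
-- what changed: A's mismatch-driven two-pointer loop with a four-way boundary-deletion case analysis is replaced by definition-level brute force: test the whole string for palindromicity, then try every single-character deletion s[:k]+s[k+1:] and palindrome-test each candidate.
import Mathlib
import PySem

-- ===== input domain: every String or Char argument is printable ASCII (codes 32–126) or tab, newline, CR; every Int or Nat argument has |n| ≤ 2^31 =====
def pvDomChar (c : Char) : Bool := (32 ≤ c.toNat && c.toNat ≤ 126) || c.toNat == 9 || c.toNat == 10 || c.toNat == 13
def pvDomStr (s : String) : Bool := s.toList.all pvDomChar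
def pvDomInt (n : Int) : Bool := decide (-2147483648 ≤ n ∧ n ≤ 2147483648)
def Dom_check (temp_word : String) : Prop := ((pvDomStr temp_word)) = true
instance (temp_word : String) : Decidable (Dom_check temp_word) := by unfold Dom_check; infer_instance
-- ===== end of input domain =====

-- B replaces A's mismatch-driven two-pointer loop with boundary-deletion case analysis by
-- brute force: a whole-string palindrome test, then a palindrome test of every
-- single-character deletion (objective: alternative algorithm, O(n^2) vs A's O(n)).

-- ===== PORT A =====
-- judge(temp): temp[::-1] == temp  (s[::-1] is List.reverse)
def judgeA (t : List Char) : Int := if t.reverse = t then 1 else 0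

-- the 'while True' two-pointer loop of A; all pyGetD indices are in range whenever it is
-- reached from check (0 ≤ i ≤ j < len), so the default ' ' is never the value Python sees.
def checkLoop (s : List Char) (i j : Int) : Int :=
  if hij : i > j then 0
  else if PySem.List.pyGetD s i ' ' = PySem.List.pyGetD s j ' ' then
    checkLoop s (i + 1) (j - 1)
  else
    if PySem.List.pyGetD s (i + 1) ' ' = PySem.List.pyGetD s j ' ' ∧
       PySem.List.pyGetD s i ' ' = PySem.List.pyGetD s (j - 1) ' ' then
      let a := judgeA (PySem.List.slice s (some (i + 1)) (some (j + 1)))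
      let b := judgeA (PySem.List.slice s (some i) (some j))
      if a = 1 ∨ b = 1 then 1 else 2
    else if PySem.List.pyGetD s (i + 1) ' ' = PySem.List.pyGetD s j ' ' then
      let a := judgeA (PySem.List.slice s (some (i + 1)) (some (j + 1)))
      if a = 1 then 1 else 2
    else if PySem.List.pyGetD s i ' ' = PySem.List.pyGetD s (j - 1) ' ' then
      let b := judgeA (PySem.List.slice s (some i) (some j))
      if b = 1 then 1 else 2
    else 2
  termination_by (j - i + 1).toNat
  decreasing_by omega

def check (temp_word : String) : Int :=
  checkLoop temp_word.toList 0 (↑temp_word.toList.length - 1)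

-- ===== PORT B =====
-- Source B's loop body: the deletion candidate temp_word[:k] + temp_word[k+1:] tested
-- against its own reversal.
def delPal (s : List Char) (k : Int) : Bool :=
  let t := PySem.List.slice s none (some k) ++ PySem.List.slice s (some (k + 1)) none
  t.reverse == t

def check_alt (temp_word : String) : Int :=
  let s := temp_word.toList
  if s.reverse = s then 0
  else if (PySem.List.pyRange 0 (↑s.length) 1).any (fun k => delPal s k) then 1 else 2

-- ===== PRECONDITION & SPEC =====
def Spec_check (temp_word : String) (out : Int) : Prop := out = check_alt temp_word
instance (temp_word : String) (out : Int) : Decidable (Spec_check temp_word out) := by unfold Spec_check; infer_instance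

-- ===== CLAIM (what is proved, stated in full; the proofs are below) =====
def Claim_equal_check : Prop := ∀ (temp_word : String), Dom_check temp_word → Spec_check temp_word (check temp_word)

-- ===== LEMMAS AND PROOFS =====

-- s mirrors at every position from k on (first half only)
def mirrorFrom (s : List Char) (k : Nat) : Prop :=
  ∀ m : Nat, k ≤ m → m + m + 1 ≤ s.length → s.getD m ' ' = s.getD (s.length - 1 - m) ' '

-- the value A's loop returns once it stands at the outermost mismatch i
def tailB (s : List Char) (i : Int) : Int :=
  let n : Int := ↑s.length
  let left := PySem.List.slice s (some (i + 1)) (some (n - i))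
  let right := PySem.List.slice s (some i) (some (n - 1 - i))
  if left.reverse = left ∨ right.reverse = right then 1 else 2

lemma pyGetD_cast (s : List Char) (m : Nat) :
    PySem.List.pyGetD s (↑m : Int) ' ' = s.getD m ' ' := by
  simp [PySem.List.pyGetD_natCast]

lemma judgeA_eq_one (t : List Char) : judgeA t = 1 ↔ t.reverse = t := by
  unfold judgeA; split_ifs with h <;> simp [h]

-- palindromicity as a pointwise condition on getD, full index range
lemma reverse_eq_iff_getD (t : List Char) :
    t.reverse = t ↔ ∀ m : Nat, m < t.length → t.getD m ' ' = t.getD (t.length - 1 - m) ' ' := by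
  constructor
  · intro h m hm
    have := List.getElem?_reverse (l := t) (i := m) hm
    rw [h] at this
    simp [List.getD_eq_getElem?_getD, this]
  · intro h
    apply List.ext_getElem?
    intro i
    by_cases hi : i < t.length
    · rw [List.getElem?_reverse hi]
      have := h i hi
      simp only [List.getD_eq_getElem?_getD, List.getElem?_eq_getElem, hi,
        (by omega : t.length - 1 - i < t.length), Option.getD_some] at this
      simp [hi, (by omega : t.length - 1 - i < t.length), this]
    · rw [List.getElem?_eq_none (by simpa using (by omega : t.length ≤ i)),
        List.getElem?_eq_none (by omega)]

lemma mirrorFrom_iff_reverse (s : List Char) : s.reverse = s ↔ mirrorFrom s 0 := by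
  rw [reverse_eq_iff_getD]
  constructor
  · intro h m _ hm; exact h m (by omega)
  · intro h m hm
    by_cases hc : m + m + 1 ≤ s.length
    · exact h m (by omega) hc
    · have := h (s.length - 1 - m) (by omega) (by omega)
      rw [(by omega : s.length - 1 - (s.length - 1 - m) = m)] at this
      exact this.symm

lemma notPal_of_ends_ne {t : List Char} (ht : 0 < t.length)
    (h : t.getD 0 ' ' ≠ t.getD (t.length - 1) ' ') : t.reverse ≠ t := by
  intro hrev
  exact h ((reverse_eq_iff_getD t).mp hrev 0 ht |>.trans (by rw [Nat.sub_zero]))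

lemma dropTake_getD (s : List Char) (a m p : Nat) (hp : p < m) :
    ((s.drop a).take m).getD p ' ' = s.getD (a + p) ' ' := by
  rw [List.getD_eq_getElem?_getD, List.getElem?_take_of_lt hp, List.getElem?_drop,
    List.getD_eq_getElem?_getD]

lemma dropTake_len (s : List Char) (a m : Nat) (hlen : a + m ≤ s.length) :
    ((s.drop a).take m).length = m := by
  simp [List.length_take, List.length_drop]; omega

-- branch collapse: at the outermost mismatch, A's four-way deletion branch equals tailB
lemma branch_collapse (s : List Char) (k : Nat)
    (hk : k + k + 2 ≤ s.length) :
    (if PySem.List.pyGetD s ((↑k : Int) + 1) ' ' = PySem.List.pyGetD s ((↑s.length : Int) - 1 - ↑k) ' ' ∧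
        PySem.List.pyGetD s (↑k : Int) ' ' = PySem.List.pyGetD s ((↑s.length : Int) - 1 - ↑k - 1) ' ' then
       let a := judgeA (PySem.List.slice s (some ((↑k : Int) + 1)) (some ((↑s.length : Int) - 1 - ↑k + 1)))
       let b := judgeA (PySem.List.slice s (some (↑k : Int)) (some ((↑s.length : Int) - 1 - ↑k)))
       if a = 1 ∨ b = 1 then 1 else 2
     else if PySem.List.pyGetD s ((↑k : Int) + 1) ' ' = PySem.List.pyGetD s ((↑s.length : Int) - 1 - ↑k) ' ' then
       let a := judgeA (PySem.List.slice s (some ((↑k : Int) + 1)) (some ((↑s.length : Int) - 1 - ↑k + 1)))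
       if a = 1 then 1 else 2
     else if PySem.List.pyGetD s (↑k : Int) ' ' = PySem.List.pyGetD s ((↑s.length : Int) - 1 - ↑k - 1) ' ' then
       let b := judgeA (PySem.List.slice s (some (↑k : Int)) (some ((↑s.length : Int) - 1 - ↑k)))
       if b = 1 then 1 else 2
     else (2 : Int)) = tailB s ↑k := by
  have hcast1 : ((↑k : Int) + 1) = ((↑(k + 1) : Int)) := by push_cast; ring
  have hcast2 : ((↑s.length : Int) - 1 - ↑k) = ((↑(s.length - 1 - k) : Int)) := by omega
  have hcast3 : ((↑(s.length - 1 - k) : Int) - 1) = ((↑(s.length - 2 - k) : Int)) := by omega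
  have hcast4 : ((↑(s.length - 1 - k) : Int) + 1) = ((↑(s.length - k) : Int)) := by omega
  have hcast5 : ((↑s.length : Int) - ↑k) = ((↑(s.length - k) : Int)) := by omega
  unfold tailB
  simp only [hcast1, hcast2, hcast3, hcast4, hcast5, pyGetD_cast, PySem.List.slice_natCast]
  simp only [(by omega : s.length - k - (k + 1) = s.length - 1 - k - k)]
  set m : Nat := s.length - 1 - k - k with hm
  set L := (s.drop (k + 1)).take m with hL
  set R := (s.drop k).take m with hR
  have hm0 : 0 < m := by omega
  have hL0 : L.getD 0 ' ' = s.getD (k + 1) ' ' := by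
    rw [hL, dropTake_getD s (k + 1) m 0 hm0]
  have hR0 : R.getD 0 ' ' = s.getD k ' ' := by
    rw [hR, dropTake_getD s k m 0 hm0, Nat.add_zero]
  have hLlen : L.length = m := dropTake_len s (k + 1) m (by omega)
  have hRlen : R.length = m := dropTake_len s k m (by omega)
  have hLlast : L.getD (L.length - 1) ' ' = s.getD (s.length - 1 - k) ' ' := by
    rw [hLlen, hL, dropTake_getD s (k + 1) m (m - 1) (by omega),
      (by omega : k + 1 + (m - 1) = s.length - 1 - k)]
  have hRlast : R.getD (R.length - 1) ' ' = s.getD (s.length - 2 - k) ' ' := by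
    rw [hRlen, hR, dropTake_getD s k m (m - 1) (by omega),
      (by omega : k + (m - 1) = s.length - 2 - k)]
  by_cases c1 : s.getD (k + 1) ' ' = s.getD (s.length - 1 - k) ' ' <;>
    by_cases c2 : s.getD k ' ' = s.getD (s.length - 2 - k) ' '
  · rw [if_pos ⟨c1, c2⟩]
    simp only [judgeA_eq_one]
  · have hRne : R.reverse ≠ R := notPal_of_ends_ne (by omega) (by rw [hR0, hRlast]; exact c2)
    rw [if_neg (fun h => c2 h.2), if_pos c1]
    simp only [judgeA_eq_one]
    simp [hRne]
  · have hLne : L.reverse ≠ L := notPal_of_ends_ne (by omega) (by rw [hL0, hLlast]; exact c1)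
    rw [if_neg (fun h => c1 h.1), if_neg c1, if_pos c2]
    simp only [judgeA_eq_one]
    simp [hLne]
  · have hRne : R.reverse ≠ R := notPal_of_ends_ne (by omega) (by rw [hR0, hRlast]; exact c2)
    have hLne : L.reverse ≠ L := notPal_of_ends_ne (by omega) (by rw [hL0, hLlast]; exact c1)
    rw [if_neg (fun h => c1 h.1), if_neg c1, if_neg c2]
    simp [hLne, hRne]

-- Lemma A: on a mirror tail the loop runs to the break and returns 0
lemma checkLoop_of_mirror (s : List Char) (d k : Nat) (hd : s.length ≤ 2 * k + d)
    (h : mirrorFrom s k) : checkLoop s ↑k ((↑s.length : Int) - 1 - ↑k) = 0 := by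
  induction d generalizing k with
  | zero => rw [checkLoop, dif_pos (by omega)]
  | succ d ih =>
    by_cases hsmall : s.length ≤ 2 * k
    · rw [checkLoop, dif_pos (by omega)]
    · have hcast2 : ((↑s.length : Int) - 1 - ↑k) = ((↑(s.length - 1 - k) : Int)) := by omega
      have heq : s.getD k ' ' = s.getD (s.length - 1 - k) ' ' := h k le_rfl (by omega)
      have heq' : PySem.List.pyGetD s (↑k) ' ' = PySem.List.pyGetD s ((↑s.length : Int) - 1 - ↑k) ' ' := by
        rw [hcast2, pyGetD_cast, pyGetD_cast]; exact heq
      rw [checkLoop, dif_neg (by omega), if_pos heq',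
        (by push_cast; ring : ((↑k : Int) + 1) = ((↑(k + 1) : Int))),
        (by omega : ((↑s.length : Int) - 1 - ↑k - 1) = ((↑s.length : Int) - 1 - ↑(k + 1)))]
      exact ih (k + 1) (by omega) (fun m hm h2 => h m (by omega) h2)

-- Lemma B: with a mismatch at or after k, the loop stops at the outermost mismatch K
-- and returns tailB s K; the accumulated mirror facts about all positions before K come out too
lemma checkLoop_of_not_mirror (s : List Char) (d k : Nat) (hd : s.length ≤ 2 * k + d)
    (h : ¬ mirrorFrom s k) :
    ∃ K : Nat, k ≤ K ∧
      (∀ m : Nat, k ≤ m → m < K → s.getD m ' ' = s.getD (s.length - 1 - m) ' ') ∧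
      s.getD K ' ' ≠ s.getD (s.length - 1 - K) ' ' ∧ K + K + 2 ≤ s.length ∧
      checkLoop s ↑k ((↑s.length : Int) - 1 - ↑k) = tailB s ↑K := by
  induction d generalizing k with
  | zero => exact (h (fun m hm h2 => absurd h2 (by omega))).elim
  | succ d ih =>
    by_cases hsmall : s.length ≤ 2 * k
    · exact (h (fun m hm h2 => absurd h2 (by omega))).elim
    · have hcast2 : ((↑s.length : Int) - 1 - ↑k) = ((↑(s.length - 1 - k) : Int)) := by omega
      by_cases heq : s.getD k ' ' = s.getD (s.length - 1 - k) ' '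
      · have heq' : PySem.List.pyGetD s (↑k) ' ' = PySem.List.pyGetD s ((↑s.length : Int) - 1 - ↑k) ' ' := by
          rw [hcast2, pyGetD_cast, pyGetD_cast]; exact heq
        have h' : ¬ mirrorFrom s (k + 1) := by
          intro hm1
          apply h
          intro m hmk h2
          rcases Nat.eq_or_lt_of_le hmk with hmk' | hmk'
          · rw [← hmk']; exact heq
          · exact hm1 m (by omega) h2
        obtain ⟨K, hkK, hmir, hne, hK2, heval⟩ := ih (k + 1) (by omega) h'
        refine ⟨K, by omega, ?_, hne, hK2, ?_⟩
        · intro m hm1 hm2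
          rcases Nat.eq_or_lt_of_le hm1 with hm' | hm'
          · rw [← hm']; exact heq
          · exact hmir m (by omega) hm2
        · rw [checkLoop, dif_neg (by omega), if_pos heq',
            (by push_cast; ring : ((↑k : Int) + 1) = ((↑(k + 1) : Int))),
            (by omega : ((↑s.length : Int) - 1 - ↑k - 1) = ((↑s.length : Int) - 1 - ↑(k + 1)))]
          exact heval
      · have hk2 : k + k + 2 ≤ s.length := by
          rcases (by omega : k + k + 2 ≤ s.length ∨ s.length = 2 * k + 1) with h' | h'
          · exact h'
          · exact absurd (by rw [(by omega : s.length - 1 - k = k)] :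
              s.getD k ' ' = s.getD (s.length - 1 - k) ' ') heq
        have heq' : ¬ (PySem.List.pyGetD s (↑k) ' ' = PySem.List.pyGetD s ((↑s.length : Int) - 1 - ↑k) ' ') := by
          rw [hcast2, pyGetD_cast, pyGetD_cast]; exact heq
        refine ⟨k, le_rfl, fun m hm1 hm2 => absurd hm2 (by omega), heq, hk2, ?_⟩
        rw [checkLoop, dif_neg (by omega), if_neg heq']
        exact branch_collapse s k hk2

-- getD of a one-deletion candidate s[:c] ++ s[c+1:]
lemma del_getD (s : List Char) (c p : Nat) (hc : c < s.length) :
    (s.take c ++ s.drop (c + 1)).getD p ' ' =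
      if p < c then s.getD p ' ' else s.getD (p + 1) ' ' := by
  have hlen : (s.take c).length = c := by simp [List.length_take]; omega
  by_cases hp : p < c
  · rw [if_pos hp, List.getD_eq_getElem?_getD, List.getElem?_append_left (by omega),
      List.getElem?_take_of_lt hp, List.getD_eq_getElem?_getD]
  · rw [if_neg hp, List.getD_eq_getElem?_getD, List.getElem?_append_right (by omega),
      List.getElem?_drop, hlen, (by omega : c + 1 + (p - c) = p + 1),
      List.getD_eq_getElem?_getD]

lemma del_len (s : List Char) (c : Nat) (hc : c < s.length) :
    (s.take c ++ s.drop (c + 1)).length = s.length - 1 := by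
  simp [List.length_take, List.length_drop]; omega

-- delPal unfolded to the candidate's palindromicity, for a Nat index
lemma delPal_eq (s : List Char) (c : Nat) :
    delPal s ↑c = true ↔
      (s.take c ++ s.drop (c + 1)).reverse = s.take c ++ s.drop (c + 1) := by
  unfold delPal
  rw [(by push_cast; ring : ((↑c : Int) + 1) = ((↑(c + 1) : Int))),
    PySem.List.slice_to_natCast, PySem.List.slice_from_natCast]
  simp

-- Core lemma: at the outermost mismatch K, A's tail value equals B's brute-force search
lemma tailB_eq_anyDel (s : List Char) (K : Nat)
    (hmir : ∀ m : Nat, m < K → s.getD m ' ' = s.getD (s.length - 1 - m) ' ')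
    (hne : s.getD K ' ' ≠ s.getD (s.length - 1 - K) ' ')
    (hK : K + K + 2 ≤ s.length) :
    tailB s ↑K =
      (if (PySem.List.pyRange 0 (↑s.length) 1).any (fun k => delPal s k) then 1 else 2) := by
  have hcast2 : ((↑s.length : Int) - 1 - ↑K) = ((↑(s.length - 1 - K) : Int)) := by omega
  have hcast4 : ((↑K : Int) + 1) = ((↑(K + 1) : Int)) := by push_cast; ring
  have hcast5 : ((↑s.length : Int) - ↑K) = ((↑(s.length - K) : Int)) := by omega
  unfold tailB
  simp only [hcast2, hcast4, hcast5, PySem.List.slice_natCast]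
  simp only [(by omega : s.length - K - (K + 1) = s.length - 1 - K - K)]
  set n := s.length with hn
  set m : Nat := n - 1 - K - K with hm
  set L := (s.drop (K + 1)).take m with hL
  set R := (s.drop K).take m with hR
  have hLlen : L.length = m := dropTake_len s (K + 1) m (by omega)
  have hRlen : R.length = m := dropTake_len s K m (by omega)
  -- characterize the three palindromicity conditions pointwise
  have hLP : L.reverse = L ↔
      ∀ p : Nat, p < m → s.getD (K + 1 + p) ' ' = s.getD (n - 1 - K - p) ' ' := by
    rw [reverse_eq_iff_getD, hLlen]
    constructor
    · intro h p hp
      have := h p hp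
      rw [hL, dropTake_getD s (K + 1) m p hp, dropTake_getD s (K + 1) m (m - 1 - p) (by omega),
        (by omega : K + 1 + (m - 1 - p) = n - 1 - K - p)] at this
      exact this
    · intro h p hp
      rw [hL, dropTake_getD s (K + 1) m p hp, dropTake_getD s (K + 1) m (m - 1 - p) (by omega),
        (by omega : K + 1 + (m - 1 - p) = n - 1 - K - p)]
      exact h p hp
  have hRP : R.reverse = R ↔
      ∀ p : Nat, p < m → s.getD (K + p) ' ' = s.getD (n - 2 - K - p) ' ' := by
    rw [reverse_eq_iff_getD, hRlen]
    constructor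
    · intro h p hp
      have := h p hp
      rw [hR, dropTake_getD s K m p hp, dropTake_getD s K m (m - 1 - p) (by omega),
        (by omega : K + (m - 1 - p) = n - 2 - K - p)] at this
      exact this
    · intro h p hp
      rw [hR, dropTake_getD s K m p hp, dropTake_getD s K m (m - 1 - p) (by omega),
        (by omega : K + (m - 1 - p) = n - 2 - K - p)]
      exact h p hp
  have hdel : ∀ c : Nat, c < n →
      ((s.take c ++ s.drop (c + 1)).reverse = s.take c ++ s.drop (c + 1) ↔
        ∀ p : Nat, p < n - 1 →
          (if p < c then s.getD p ' ' else s.getD (p + 1) ' ') =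
          (if n - 2 - p < c then s.getD (n - 2 - p) ' ' else s.getD (n - 1 - p) ' ')) := by
    intro c hc
    rw [reverse_eq_iff_getD, del_len s c hc]
    constructor
    · intro h p hp
      have := h p hp
      rw [del_getD s c p hc, (by omega : n - 1 - 1 - p = n - 2 - p),
        del_getD s c (n - 2 - p) hc, (by omega : n - 2 - p + 1 = n - 1 - p)] at this
      exact this
    · intro h p hp
      rw [del_getD s c p hc, (by omega : n - 1 - 1 - p = n - 2 - p),
        del_getD s c (n - 2 - p) hc, (by omega : n - 2 - p + 1 = n - 1 - p)]
      exact h p hp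
  -- the equivalence between the two sides' conditions
  have key : (L.reverse = L ∨ R.reverse = R) ↔
      (PySem.List.pyRange 0 (↑n) 1).any (fun k => delPal s k) = true := by
    rw [List.any_eq_true]
    constructor
    · rintro (hLp | hRp)
      · -- delete at K
        refine ⟨↑K, by rw [PySem.List.mem_pyRange_one]; omega, ?_⟩
        rw [delPal_eq, hdel K (by omega)]
        intro p hp
        have hLp' := hLP.mp hLp
        by_cases h1 : p < K
        · rw [if_pos h1, if_neg (by omega)]
          exact hmir p (by omega)
        · rw [if_neg h1]
          by_cases h2 : n - 2 - p < K
          · rw [if_pos h2]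
            have := hmir (n - 2 - p) h2
            rw [(by omega : n - 1 - (n - 2 - p) = p + 1)] at this
            exact this.symm
          · rw [if_neg h2]
            have := hLp' (p - K) (by omega)
            rw [(by omega : K + 1 + (p - K) = p + 1), (by omega : n - 1 - K - (p - K) = n - 1 - p)] at this
            exact this
      · -- delete at n - 1 - K
        refine ⟨↑(n - 1 - K), by rw [PySem.List.mem_pyRange_one]; omega, ?_⟩
        rw [delPal_eq, hdel (n - 1 - K) (by omega)]
        intro p hp
        have hRp' := hRP.mp hRp
        by_cases h1 : p < K
        · rw [if_pos (by omega), if_neg (by omega)]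
          exact hmir p (by omega)
        · by_cases h3 : p < n - 1 - K
          · rw [if_pos (by omega), if_pos (by omega)]
            have := hRp' (p - K) (by omega)
            rw [(by omega : K + (p - K) = p), (by omega : n - 2 - K - (p - K) = n - 2 - p)] at this
            exact this
          · rw [if_neg (by omega), if_pos (by omega)]
            have := hmir (n - 2 - p) (by omega)
            rw [(by omega : n - 1 - (n - 2 - p) = p + 1)] at this
            exact this.symm
    · rintro ⟨x, hxmem, hx⟩
      rw [PySem.List.mem_pyRange_one] at hxmem
      obtain ⟨c, rfl⟩ : ∃ c : Nat, x = ↑c := ⟨x.toNat, by omega⟩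
      have hcn : c < n := by exact_mod_cast (by omega : (↑c : Int) < ↑n)
      rw [delPal_eq, hdel c hcn] at hx
      by_cases hck : c ≤ K
      · -- the deletion at c forces L to be a palindrome
        left
        rw [hLP]
        intro p hp
        have := hx (K + p) (by omega)
        rw [if_neg (by omega), if_neg (by omega),
          (by omega : K + p + 1 = K + 1 + p), (by omega : n - 1 - (K + p) = n - 1 - K - p)] at this
        exact this
      · by_cases hcj : n - 1 - K ≤ c
        · -- the deletion at c forces R to be a palindrome
          right
          rw [hRP]
          intro p hp
          have := hx (K + p) (by omega)
          rw [if_pos (by omega), if_pos (by omega),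
            (by omega : n - 2 - (K + p) = n - 2 - K - p)] at this
          exact this
        · -- K < c < n - 1 - K: contradiction with the mismatch at K
          exfalso
          have := hx K (by omega)
          rw [if_pos (by omega), if_neg (by omega)] at this
          exact hne this
  by_cases hcase : L.reverse = L ∨ R.reverse = R
  · rw [if_pos hcase, if_pos (key.mp hcase)]
  · rw [if_neg hcase]
    rw [if_neg (fun h => hcase (key.mpr h))]

-- ===== VERDICT (by name: the statement is the Claim_ definition above) =====
theorem check_spec : Claim_equal_check := by
  intro w _
  unfold Spec_check check check_alt
  set s := w.toList with hs
  by_cases hpal : s.reverse = s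
  · have h0 : mirrorFrom s 0 := (mirrorFrom_iff_reverse s).mp hpal
    simp only [hpal, if_true]
    have := checkLoop_of_mirror s s.length 0 (by omega) h0
    simpa using this
  · have h0 : ¬ mirrorFrom s 0 := fun h => hpal ((mirrorFrom_iff_reverse s).mpr h)
    simp only [hpal, if_false]
    obtain ⟨K, _, hmir, hne, hK2, heval⟩ := checkLoop_of_not_mirror s s.length 0 (by omega) h0
    have heval' : checkLoop s 0 ((↑s.length : Int) - 1) = tailB s ↑K := by
      simpa using heval
    rw [heval', tailB_eq_anyDel s K (fun m hm => hmir m (Nat.zero_le m) hm) hne hK2]
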